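-- pv_equiv track=rewrite | github.com/alexandrefilimonov/Python1Lesson3 | alexfilimonov_python1_lesson3_method1.py | fibonnachi
-- ===== SOURCE A (Python) =====
-- def fibonnachi(n,m):
-- #example is n=5, m=8 will give 5 8 13 21
--     i1=1
--     i2=1
--     s=""
--     i=1
--     while  (i<=m) :
--         if  i>=n :
--             s = s+" "+str(i1)
--         t = i2
--         i2=i2+i1
--         i1=t
--         i=i+1
--     return s
-- ===== SOURCE B (Python) =====
-- def _fib_pair(k):
--     # fast doubling: returns (F(k), F(k+1)) with F(1)=F(2)=1
--     if k == 0: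
--         return (0, 1)
--     a, b = _fib_pair(k // 2)
--     c = a * (2 * b - a)
--     d = a * a + b * b
--     if k % 2 == 0:
--         return (c, d)
--     else:
--         return (d, c + d)
--
-- def fibonnachi(n, m):
--     lo = n if n > 1 else 1
--     if m < lo:
--         return ""
--     a, b = _fib_pair(lo)
--     parts = []
--     for _ in range(lo, m + 1):
--         parts.append(str(a))
--         a, b = b, a + b
--     return " " + " ".join(parts)
-- ===== Notes on version B (the rewrite author's own statement) =====
-- stated objective: alternative
-- what changed: Instead of iterating the Fibonacci pair from index 1 and concatenating into a growing string, B jumps to the first printed index with fast doubling (F(k) from F(k/2)) and then iterates only over the printed range n..m, joining the collected parts once.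
import Mathlib
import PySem

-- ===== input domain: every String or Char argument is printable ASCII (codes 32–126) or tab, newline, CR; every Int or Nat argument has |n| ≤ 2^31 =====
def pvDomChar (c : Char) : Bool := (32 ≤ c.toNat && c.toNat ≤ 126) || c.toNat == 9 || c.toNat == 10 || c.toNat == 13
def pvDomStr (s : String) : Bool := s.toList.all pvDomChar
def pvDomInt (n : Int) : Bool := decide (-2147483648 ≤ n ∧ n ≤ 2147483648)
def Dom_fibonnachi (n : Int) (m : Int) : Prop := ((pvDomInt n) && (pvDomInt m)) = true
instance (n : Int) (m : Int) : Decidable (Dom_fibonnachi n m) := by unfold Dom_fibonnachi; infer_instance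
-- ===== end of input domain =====

-- B reaches the first printed index by fast doubling instead of iterating from index 1,
-- then iterates only over the printed range n..m and joins the parts once (objective: alternative).

-- ===== PORT A =====
-- A's while loop; the string is carried as List Char (PySem.Chars representation), wrapped
-- into String at the end; 's + " " + str(i1)' is s ++ ' ' :: PySem.Int.toChars i1 (exact).
def fibLoopA (n m : Int) (i1 i2 : Int) (s : List Char) (i : Int) : List Char :=
  if i ≤ m then
    fibLoopA n m i2 (i2 + i1) (if n ≤ i then s ++ ' ' :: PySem.Int.toChars i1 else s) (i + 1)
  else s
termination_by (m + 1 - i).toNat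
decreasing_by omega

def fibonnachi (n : Int) (m : Int) : String :=
  String.ofList (fibLoopA n m 1 1 [] 1)

-- ===== PORT B =====
-- fast doubling: _fib_pair(k) = (F(k), F(k+1))
def fibPair (k : Nat) : Int × Int :=
  if h : k = 0 then (0, 1)
  else
    let p := fibPair (k / 2)
    let a := p.1
    let b := p.2
    let c := a * (2 * b - a)
    let d := a * a + b * b
    if k % 2 == 0 then (c, d) else (d, c + d)
termination_by k
decreasing_by exact Nat.div_lt_self (Nat.pos_of_ne_zero h) (by omega)

-- the 'for _ in range(lo, m+1): parts.append(str(a)); a, b = b, a+b' loop, by its count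
def fibLoopB (a b : Int) : Nat → List (List Char)
  | 0 => []
  | c + 1 => PySem.Int.toChars a :: fibLoopB b (a + b) c

-- '" " + " ".join(parts)' is ' ' :: PySem.Chars.join [' '] parts (exact)
def fibonnachi_alt (n : Int) (m : Int) : String :=
  let lo : Int := if 1 < n then n else 1
  if m < lo then ""
  else
    let p := fibPair lo.toNat
    String.ofList (' ' :: PySem.Chars.join [' '] (fibLoopB p.1 p.2 (m + 1 - lo).toNat))

-- ===== PRECONDITION & SPEC =====
def Spec_fibonnachi (n : Int) (m : Int) (out : String) : Prop := out = fibonnachi_alt n m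
instance (n : Int) (m : Int) (out : String) : Decidable (Spec_fibonnachi n m out) := by unfold Spec_fibonnachi; infer_instance

-- ===== CLAIM (what is proved, stated in full; the proofs are below) =====
def Claim_equal_fibonnachi : Prop := ∀ (n : Int) (m : Int), Dom_fibonnachi n m → Spec_fibonnachi n m (fibonnachi n m)

-- ===== LEMMAS AND PROOFS =====

-- the characters A's loop appends while the counter runs j, j+1, …, j+c-1
def specA (n : Int) (j : Nat) : Nat → List Char
  | 0 => []
  | c + 1 => (if n ≤ (j : Int) then ' ' :: PySem.Int.toChars (Nat.fib j) else []) ++ specA n (j + 1) c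

-- the list of rendered Fibonacci numbers F j, …, F (j+c-1)
def specB (j : Nat) : Nat → List (List Char)
  | 0 => []
  | c + 1 => PySem.Int.toChars (Nat.fib j) :: specB (j + 1) c

theorem fib_cast_add (j : Nat) :
    (Nat.fib (j + 1) : Int) + (Nat.fib j : Int) = (Nat.fib (j + 1 + 1) : Int) := by
  rw [show j + 1 + 1 = j + 2 from rfl, Nat.fib_add_two]; push_cast; ring

theorem loopA_eq (n m : Int) : ∀ (c : Nat) (j : Nat) (s : List Char),
    (m + 1 - (j : Int)).toNat = c →
    fibLoopA n m (Nat.fib j) (Nat.fib (j + 1)) s (j : Int) = s ++ specA n j c := by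
  intro c
  induction c with
  | zero =>
    intro j s hc
    rw [fibLoopA, if_neg (by omega)]
    simp [specA]
  | succ c ih =>
    intro j s hc
    rw [fibLoopA, if_pos (by omega), fib_cast_add j,
      show (j : Int) + 1 = ((j + 1 : Nat) : Int) by push_cast; ring,
      ih (j + 1) _ (by push_cast; omega)]
    by_cases hn : n ≤ (j : Int)
    · rw [if_pos hn]
      simp only [specA, if_pos hn, List.append_assoc, List.cons_append]
    · rw [if_neg hn]
      simp only [specA, if_neg hn, List.nil_append]

theorem fibPair_eq : ∀ (k : Nat), fibPair k = ((Nat.fib k : Int), (Nat.fib (k + 1) : Int)) := by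
  intro k
  induction k using Nat.strong_induction_on with
  | _ k ih =>
    rw [fibPair]
    by_cases h : k = 0
    · simp [h]
    · rw [dif_neg h]
      have ihk := ih (k / 2) (Nat.div_lt_self (Nat.pos_of_ne_zero h) (by omega))
      have hle : Nat.fib (k / 2) ≤ 2 * Nat.fib (k / 2 + 1) :=
        le_trans Nat.fib_le_fib_succ (by omega)
      have hc : (Nat.fib (k / 2) : Int) * (2 * (Nat.fib (k / 2 + 1) : Int) - (Nat.fib (k / 2) : Int))
          = (Nat.fib (2 * (k / 2)) : Int) := by
        rw [Nat.fib_two_mul, Nat.cast_mul, Nat.cast_sub hle]; push_cast; ring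
      have hd : (Nat.fib (k / 2) : Int) * (Nat.fib (k / 2) : Int)
            + (Nat.fib (k / 2 + 1) : Int) * (Nat.fib (k / 2 + 1) : Int)
          = (Nat.fib (2 * (k / 2) + 1) : Int) := by
        rw [Nat.fib_two_mul_add_one]; push_cast; ring
      simp only [ihk]
      by_cases hp : k % 2 = 0
      · have hk : 2 * (k / 2) = k := by omega
        rw [if_pos (by simpa using hp), hc, hd, hk, show k + 1 = 2 * (k / 2) + 1 by omega]
      · have hk : 2 * (k / 2) + 1 = k := by omega
        rw [if_neg (by simpa using hp), hc, hd, hk, show k + 1 = 2 * (k / 2) + 2 by omega,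
          Nat.fib_add_two, hk]
        simp only [Prod.mk.injEq, true_and]
        push_cast
        ring

theorem loopB_eq : ∀ (c : Nat) (j : Nat),
    fibLoopB (Nat.fib j) (Nat.fib (j + 1)) c = specB j c := by
  intro c
  induction c with
  | zero => intro j; rfl
  | succ c ih =>
    intro j
    rw [fibLoopB, show (Nat.fib j : Int) + (Nat.fib (j + 1) : Int) = (Nat.fib (j + 1 + 1) : Int)
        by rw [← fib_cast_add]; ring, ih (j + 1)]
    rfl

theorem specA_nil (n : Int) : ∀ (c : Nat) (j : Nat), (j : Int) + c ≤ n → specA n j c = [] := by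
  intro c
  induction c with
  | zero => intro j _; rfl
  | succ c ih =>
    intro j h
    simp only [specA, if_neg (show ¬ n ≤ (j : Int) by push_cast at h ⊢; omega), List.nil_append]
    exact ih (j + 1) (by push_cast at h ⊢; omega)

theorem specA_skip (n : Int) : ∀ (d : Nat) (j c : Nat), (j : Int) + d ≤ n →
    specA n j (c + d) = specA n (j + d) c := by
  intro d
  induction d with
  | zero => intro j c _; rfl
  | succ d ih =>
    intro j c h
    rw [show c + (d + 1) = (c + d) + 1 from rfl]
    simp only [specA, if_neg (show ¬ n ≤ (j : Int) by push_cast at h ⊢; omega), List.nil_append]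
    rw [ih (j + 1) c (by push_cast at h ⊢; omega)]
    congr 1
    omega

theorem specA_join (n : Int) : ∀ (c : Nat) (j : Nat), n ≤ (j : Int) →
    specA n j (c + 1) = ' ' :: PySem.Chars.join [' '] (specB j (c + 1)) := by
  intro c
  induction c with
  | zero =>
    intro j h
    simp only [specA, specB, if_pos h, PySem.Chars.join_singleton, List.append_nil]
  | succ c ih =>
    intro j h
    rw [show specA n j (c + 1 + 1)
        = (if n ≤ (j : Int) then ' ' :: PySem.Int.toChars (Nat.fib j) else [])
          ++ specA n (j + 1) (c + 1) from rfl,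
      if_pos h, ih (j + 1) (by push_cast at h ⊢; omega)]
    show (' ' :: PySem.Int.toChars (Nat.fib j)) ++ ' ' :: PySem.Chars.join [' '] (specB (j + 1) (c + 1))
        = ' ' :: PySem.Chars.join [' '] (specB j (c + 1 + 1))
    rw [show specB j (c + 1 + 1)
        = PySem.Int.toChars (Nat.fib j) :: PySem.Int.toChars (Nat.fib (j + 1)) :: specB (j + 1 + 1) c
        from rfl,
      PySem.Chars.join_cons_cons,
      show specB (j + 1) (c + 1)
        = PySem.Int.toChars (Nat.fib (j + 1)) :: specB (j + 1 + 1) c from rfl]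
    simp [List.append_assoc]

-- ===== VERDICT (by name: the statement is the Claim_ definition above) =====
theorem fibonnachi_spec : Claim_equal_fibonnachi := by
  unfold Claim_equal_fibonnachi Spec_fibonnachi
  intro n m _
  have hA : fibonnachi n m = String.ofList (specA n 1 m.toNat) := by
    have h := loopA_eq n m (m + 1 - ((1 : Nat) : Int)).toNat 1 [] rfl
    norm_num at h
    unfold fibonnachi
    rw [h]
  rw [hA]
  unfold fibonnachi_alt
  by_cases hn : 1 < n
  · simp only [if_pos hn]
    by_cases hm : m < n
    · rw [if_pos hm]
      rw [specA_nil n m.toNat 1 (by push_cast; omega)]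
    · rw [if_neg hm, fibPair_eq, loopB_eq]
      have hd : m.toNat = (m + 1 - n).toNat + (n.toNat - 1) := by omega
      rw [hd, specA_skip n (n.toNat - 1) 1 _ (by push_cast; omega)]
      have hj : 1 + (n.toNat - 1) = n.toNat := by omega
      rw [hj]
      obtain ⟨c, hc⟩ : ∃ c, (m + 1 - n).toNat = c + 1 := ⟨(m + 1 - n).toNat - 1, by omega⟩
      rw [hc, specA_join n c n.toNat (by omega)]
  · simp only [if_neg hn]
    by_cases hm : m < 1
    · rw [if_pos hm]
      rw [show m.toNat = 0 by omega]
      rfl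
    · rw [if_neg hm]
      rw [show (1 : Int).toNat = 1 from rfl, fibPair_eq, loopB_eq]
      obtain ⟨c, hc⟩ : ∃ c, (m + 1 - 1).toNat = c + 1 := ⟨(m + 1 - 1).toNat - 1, by omega⟩
      rw [hc, show m.toNat = c + 1 by omega]
      rw [specA_join n c 1 (by omega)]
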